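-- pv_equiv track=rewrite | github.com/MMR-19/Open-ended-NER | 0. Helpers/reflection_helpers.py | get_token_context_exclude
-- ===== SOURCE A (Python) =====
-- import unicodedata
--
-- def char_is_punctuation(ch):
--     return unicodedata.category(ch).startswith("P")
--
-- def word_only_punctuation(text):
--     return len(text) > 0 and all(char_is_punctuation(ch) for ch in text)
--
-- def get_token_context_exclude(tokens, center_idx, context_length = 2):
--
--     left_tokens = []
--     go_left_idx = center_idx
--
--     while go_left_idx > 0 and len(left_tokens) < context_length:
--         potential_token = tokens[go_left_idx - 1]
--         go_left_idx -= 1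
--
--         # only count if token is relevant (ignore punctuation)
--         if not word_only_punctuation(potential_token):
--             left_tokens.append(potential_token)
--
--     # invert left_tokens
--     if left_tokens:
--         left_tokens.reverse()
--
--     right_tokens = []
--     go_right_idx = center_idx
--
--     while go_right_idx < len(tokens) - 1 and len(right_tokens) < context_length:
--         potential_token = tokens[go_right_idx + 1]
--         go_right_idx += 1
--
--         # only count if token is relevant (ignore punctuation)
--         if not word_only_punctuation(potential_token):
--             right_tokens.append(potential_token)
--
--     return left_tokens + right_tokens
-- ===== SOURCE B (Python) =====
-- import unicodedata
--
-- def char_is_punctuation(ch):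
--     return unicodedata.category(ch).startswith("P")
--
-- def word_only_punctuation(text):
--     return len(text) > 0 and all(char_is_punctuation(ch) for ch in text)
--
-- def get_token_context_exclude(tokens, center_idx, context_length = 2):
--     if context_length <= 0:
--         return []
--     left = [t for t in tokens[:center_idx] if not word_only_punctuation(t)]
--     right = [t for t in tokens[center_idx + 1:] if not word_only_punctuation(t)]
--     return left[-context_length:] + right[:context_length]
-- ===== Notes on version B (the rewrite author's own statement) =====
-- stated objective: simpler
-- what changed: Replaces the two index-walking while loops (with end-of-loop reversal) by slice-then-filter comprehensions: left context = last context_length non-punctuation tokens of tokens[:center_idx], right context = first context_length of tokens[center_idx+1:], with an explicit context_length <= 0 guard.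
-- outside the precondition, e.g. on get_token_context_exclude(['a', 'b', 'c'], -2, 2): A returns ['c', 'a'], B returns ['a', 'c']; on get_token_context_exclude(['a', 'b'], 5, 1): A raises IndexError, B returns ['b']
import Mathlib
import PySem

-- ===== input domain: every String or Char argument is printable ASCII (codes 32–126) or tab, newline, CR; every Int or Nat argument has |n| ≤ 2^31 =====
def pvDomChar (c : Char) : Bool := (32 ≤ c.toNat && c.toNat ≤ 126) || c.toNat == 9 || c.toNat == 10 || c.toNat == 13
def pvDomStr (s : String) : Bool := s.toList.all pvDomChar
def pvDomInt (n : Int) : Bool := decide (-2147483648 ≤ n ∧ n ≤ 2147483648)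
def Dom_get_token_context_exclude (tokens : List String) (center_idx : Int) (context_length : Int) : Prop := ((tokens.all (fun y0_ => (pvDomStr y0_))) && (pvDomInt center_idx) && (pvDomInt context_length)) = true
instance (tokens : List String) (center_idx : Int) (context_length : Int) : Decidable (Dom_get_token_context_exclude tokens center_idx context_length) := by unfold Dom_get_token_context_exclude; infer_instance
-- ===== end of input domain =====

-- B replaces A's two index-walking while loops by slice-then-filter comprehensions (simpler decomposition, same cost).

-- ===== PORT A =====
-- unicodedata.category(ch).startswith("P"): exact on the Dom charset (printable ASCII + tab/newline/CR);
-- these are precisely the ASCII characters whose Unicode category starts with "P".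
def char_is_punctuation (c : Char) : Bool :=
  ['!','"','#','%','&','\'','(',')','*',',','-','.','/',':',';','?','@','[','\\',']','_','{','}'].contains c

def word_only_punctuation (s : String) : Bool :=
  decide (0 < s.toList.length) && s.toList.all char_is_punctuation

-- the first while loop of A (left context), collecting by appending, reversed afterwards
def pvLeftLoop (tokens : List String) (cl : Int) (go : Int) (acc : List String) : List String :=
  if _h : 0 < go ∧ (acc.length : Int) < cl then
    match PySem.List.pyGet? tokens (go - 1) with
    | none => acc   -- IndexError in Python (outside Pre_)
    | some t => pvLeftLoop tokens cl (go - 1) (if !word_only_punctuation t then acc ++ [t] else acc)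
  else acc
termination_by go.toNat
decreasing_by omega

-- the second while loop of A (right context)
def pvRightLoop (tokens : List String) (cl : Int) (go : Int) (acc : List String) : List String :=
  if _h : go < (tokens.length : Int) - 1 ∧ (acc.length : Int) < cl then
    match PySem.List.pyGet? tokens (go + 1) with
    | none => acc   -- IndexError in Python (outside Pre_)
    | some t => pvRightLoop tokens cl (go + 1) (if !word_only_punctuation t then acc ++ [t] else acc)
  else acc
termination_by ((tokens.length : Int) - 1 - go).toNat
decreasing_by omega

def get_token_context_exclude (tokens : List String) (center_idx : Int) (context_length : Int) : List String :=
  let left_tokens := pvLeftLoop tokens context_length center_idx []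
  let left_tokens := if left_tokens.isEmpty then left_tokens else left_tokens.reverse
  let right_tokens := pvRightLoop tokens context_length center_idx []
  left_tokens ++ right_tokens

-- ===== PORT B =====
def get_token_context_exclude_alt (tokens : List String) (center_idx : Int) (context_length : Int) : List String :=
  if context_length ≤ 0 then []
  else
    let left := (PySem.List.slice tokens none (some center_idx)).filter (fun t => !word_only_punctuation t)
    let right := (PySem.List.slice tokens (some (center_idx + 1)) none).filter (fun t => !word_only_punctuation t)
    PySem.List.slice left (some (-context_length)) none ++ PySem.List.slice right none (some context_length)

-- ===== PRECONDITION & SPEC =====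
-- Pre_ restricts center_idx to the natural domain 0 ≤ center_idx ≤ len(tokens) whenever context_length is
-- positive (plus everything with context_length ≤ 0, where A trivially returns []): for center_idx > len(tokens)
-- with positive context_length A raises IndexError, and for negative center_idx with positive context_length A's
-- value is an accident of Python's negative-index wraparound in its right-hand while loop (it walks from the
-- wrapped position past the end of the list back to the front), which no caller would specify.
def Pre_get_token_context_exclude (tokens : List String) (center_idx : Int) (context_length : Int) : Prop :=
  (0 ≤ center_idx ∧ center_idx ≤ (tokens.length : Int)) ∨ context_length ≤ 0
instance (tokens : List String) (center_idx : Int) (context_length : Int) : Decidable (Pre_get_token_context_exclude tokens center_idx context_length) := by unfold Pre_get_token_context_exclude; infer_instance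

def pvWitness_get_token_context_exclude : List String × Int × Int := (["hello", ",", "world"], 1, 2)

def Spec_get_token_context_exclude (tokens : List String) (center_idx : Int) (context_length : Int) (out : List String) : Prop := out = get_token_context_exclude_alt tokens center_idx context_length
instance (tokens : List String) (center_idx : Int) (context_length : Int) (out : List String) : Decidable (Spec_get_token_context_exclude tokens center_idx context_length out) := by unfold Spec_get_token_context_exclude; infer_instance

-- ===== CLAIM (what is proved, stated in full; the proofs are below) =====
def Claim_equal_get_token_context_exclude : Prop := ∀ (tokens : List String) (center_idx : Int) (context_length : Int), Dom_get_token_context_exclude tokens center_idx context_length → Pre_get_token_context_exclude tokens center_idx context_length → Spec_get_token_context_exclude tokens center_idx context_length (get_token_context_exclude tokens center_idx context_length)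

-- ===== LEMMAS AND PROOFS =====

theorem pvLeftLoop_spec (tokens : List String) (cl : Int) (g : Nat) (hg : g ≤ tokens.length) (acc : List String) :
    pvLeftLoop tokens cl (g : Int) acc =
      acc ++ (((tokens.take g).reverse.filter (fun t => !word_only_punctuation t)).take (cl - acc.length).toNat) := by
  induction g generalizing acc with
  | zero => rw [pvLeftLoop]; simp
  | succ n ih =>
    rw [pvLeftLoop]
    have hlt : n < tokens.length := by omega
    have hcast : ((n + 1 : Nat) : Int) - 1 = (n : Int) := by push_cast; ring
    have hget : PySem.List.pyGet? tokens (((n + 1 : Nat) : Int) - 1) = some tokens[n] := by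
      rw [hcast, PySem.List.pyGet?_natCast, List.getElem?_eq_getElem hlt]
    have htake : (tokens.take (n + 1)).reverse = tokens[n] :: (tokens.take n).reverse := by
      rw [List.take_add_one, List.getElem?_eq_getElem hlt]; simp
    by_cases hcl : (acc.length : Int) < cl
    · rw [dif_pos ⟨by exact_mod_cast Nat.succ_pos n, hcl⟩, hget, hcast, htake]
      show pvLeftLoop tokens cl (n : Int)
          (if (!word_only_punctuation tokens[n]) = true then acc ++ [tokens[n]] else acc) = _
      by_cases hw : word_only_punctuation tokens[n]
      · rw [if_neg (by simp [hw]), ih (by omega) acc]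
        simp [hw]
      · rw [if_pos (by simp [hw]), ih (by omega) (acc ++ [tokens[n]])]
        have hm : ∃ k, (cl - (acc.length : Int)).toNat = k + 1 := ⟨(cl - (acc.length : Int)).toNat - 1, by omega⟩
        obtain ⟨k, hk⟩ := hm
        have hk' : (cl - ((acc ++ [tokens[n]]).length : Int)).toNat = k := by simp; omega
        rw [hk']
        simp [hw, hk, List.take_succ_cons]
    · rw [dif_neg (by push_cast; omega)]
      have h0 : (cl - (acc.length : Int)).toNat = 0 := by omega
      simp [h0]

theorem pvRightLoop_spec (tokens : List String) (cl : Int) (fuel : Nat) :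
    ∀ (g : Nat) (acc : List String), tokens.length - g ≤ fuel →
    pvRightLoop tokens cl (g : Int) acc =
      acc ++ (((tokens.drop (g + 1)).filter (fun t => !word_only_punctuation t)).take (cl - acc.length).toNat) := by
  induction fuel with
  | zero =>
    intro g acc hf
    rw [pvRightLoop, dif_neg (by push_cast; omega), List.drop_eq_nil_of_le (by omega)]
    simp
  | succ m ih =>
    intro g acc hf
    rw [pvRightLoop]
    by_cases hg1 : g + 1 < tokens.length
    · by_cases hcl : (acc.length : Int) < cl
      · rw [dif_pos ⟨by push_cast; omega, hcl⟩]
        have hcast : (g : Int) + 1 = ((g + 1 : Nat) : Int) := by push_cast; ring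
        have hget : PySem.List.pyGet? tokens ((g : Int) + 1) = some tokens[g + 1] := by
          rw [hcast, PySem.List.pyGet?_natCast, List.getElem?_eq_getElem hg1]
        rw [hget, hcast]
        show pvRightLoop tokens cl ((g + 1 : Nat) : Int)
            (if (!word_only_punctuation tokens[g + 1]) = true then acc ++ [tokens[g + 1]] else acc) = _
        rw [ih (g + 1) _ (by omega), List.drop_eq_getElem_cons hg1]
        by_cases hw : word_only_punctuation tokens[g + 1]
        · rw [if_neg (by simp [hw]), List.filter_cons_of_neg (by simp [hw])]
        · rw [if_pos (by simp [hw])]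
          have hm : ∃ k, (cl - (acc.length : Int)).toNat = k + 1 := ⟨(cl - (acc.length : Int)).toNat - 1, by omega⟩
          obtain ⟨k, hk⟩ := hm
          have hk' : (cl - ((acc ++ [tokens[g + 1]]).length : Int)).toNat = k := by simp; omega
          rw [hk', List.filter_cons_of_pos (by simp [hw]), hk, List.take_succ_cons]
          simp
      · rw [dif_neg (by push_cast; omega)]
        have : (cl - (acc.length : Int)).toNat = 0 := by omega
        simp [this]
    · rw [dif_neg (by push_cast; omega), List.drop_eq_nil_of_le (by omega)]
      simp

theorem if_isEmpty_reverse (l : List String) : (if l.isEmpty then l else l.reverse) = l.reverse := by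
  cases l <;> simp

-- ===== VERDICT (by name: the statement is the Claim_ definition above) =====

theorem get_token_context_exclude_spec : Claim_equal_get_token_context_exclude := by
  intro tokens c cl _ hpre
  unfold Spec_get_token_context_exclude
  by_cases hcl : cl ≤ 0
  · unfold get_token_context_exclude get_token_context_exclude_alt
    rw [pvLeftLoop, pvRightLoop, dif_neg (by simp; omega), dif_neg (by simp; omega), if_pos hcl]
    simp
  · have hc : 0 ≤ c ∧ c ≤ (tokens.length : Int) := by
      rcases hpre with h | h
      · exact h
      · omega
    obtain ⟨hc0, hcLen⟩ := hc
    obtain ⟨k, hk⟩ : ∃ k : Nat, c = (k : Int) := ⟨c.toNat, by omega⟩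
    subst hk
    have hkLen : k ≤ tokens.length := by exact_mod_cast hcLen
    unfold get_token_context_exclude get_token_context_exclude_alt
    rw [pvLeftLoop_spec tokens cl k hkLen [], pvRightLoop_spec tokens cl (tokens.length) k [] (by omega)]
    simp only [List.nil_append, List.length_nil, Nat.cast_zero, Int.sub_zero, if_isEmpty_reverse]
    rw [if_neg hcl]
    have hn : ∃ n : Nat, cl = (n : Int) ∧ 0 < n := ⟨cl.toNat, by omega, by omega⟩
    obtain ⟨n, hcln, hn0⟩ := hn
    subst hcln
    rw [PySem.List.slice_to tokens (by omega), PySem.List.slice_from tokens (by omega)]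
    have h1 : ((k : Int) : Int).toNat = k := by omega
    have h2 : ((k : Int) + 1).toNat = k + 1 := by omega
    rw [h1, h2, Int.toNat_natCast]
    rw [PySem.List.slice_from_neg_natCast _ n hn0,
        PySem.List.slice_to _ (by omega : (0:Int) ≤ (n : Int))]
    rw [List.filter_reverse, List.take_reverse, List.reverse_reverse, Int.toNat_natCast]
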